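-- pv_equiv track=rewrite | github.com/cricket1/jktech_python_assignments | day3/odd_even_character.py | change_odd_upper_even_lower
-- ===== SOURCE A (Python) =====
-- def change_odd_upper_even_lower(my_string):
--     final_str = ""
--     for idx, char in enumerate(my_string):
--         if (idx + 1) % 2:
--             char = char.upper()
--         else:
--             char = char.lower()
--         final_str = final_str + char
--     return final_str
-- ===== SOURCE B (Python) =====
-- def change_odd_upper_even_lower(my_string):
--     pieces = []
--     i = 0
--     n = len(my_string)
--     while i < n:
--         pieces.append(my_string[i].upper())
--         if i + 1 < n:
--             pieces.append(my_string[i + 1].lower())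
--         i += 2
--     return "".join(pieces)
-- ===== Notes on version B (the rewrite author's own statement) =====
-- stated objective: alternative
-- what changed: B consumes the string two characters per step (upper the first, lower the second if present) collecting pieces joined once, instead of A's per-character parity branch with repeated string concatenation.
import Mathlib
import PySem

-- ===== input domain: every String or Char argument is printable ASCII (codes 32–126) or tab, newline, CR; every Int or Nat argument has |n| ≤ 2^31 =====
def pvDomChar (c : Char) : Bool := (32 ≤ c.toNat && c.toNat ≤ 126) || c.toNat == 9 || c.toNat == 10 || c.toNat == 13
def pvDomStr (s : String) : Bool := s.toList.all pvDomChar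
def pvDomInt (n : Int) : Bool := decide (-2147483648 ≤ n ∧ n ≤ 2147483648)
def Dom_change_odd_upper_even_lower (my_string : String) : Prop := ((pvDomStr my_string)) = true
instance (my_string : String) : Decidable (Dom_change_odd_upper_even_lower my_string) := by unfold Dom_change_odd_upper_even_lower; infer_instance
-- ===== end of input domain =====

-- B consumes two characters per step instead of branching on each index's parity; equivalence of return values (A is pure).

-- ===== PORT A =====
def change_odd_upper_even_lower (my_string : String) : String :=
  String.ofList ((PySem.List.enumerate my_string.toList 0).foldl
    (fun final_str p =>
      final_str ++ [if PySem.Int.mod (p.1 + 1) 2 ≠ 0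
                    then PySem.Chars.upperChar p.2
                    else PySem.Chars.lowerChar p.2])
    [])

-- ===== PORT B =====
-- the while loop of Source B: take my_string[i] (upper) and, if present, my_string[i+1] (lower), i += 2
def pvPairsB : List Char → List Char
  | [] => []
  | [a] => [PySem.Chars.upperChar a]
  | a :: b :: rest => PySem.Chars.upperChar a :: PySem.Chars.lowerChar b :: pvPairsB rest

def change_odd_upper_even_lower_alt (my_string : String) : String :=
  String.ofList (pvPairsB my_string.toList)

-- ===== PRECONDITION & SPEC =====
def Spec_change_odd_upper_even_lower (my_string : String) (out : String) : Prop := out = change_odd_upper_even_lower_alt my_string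
instance (my_string : String) (out : String) : Decidable (Spec_change_odd_upper_even_lower my_string out) := by unfold Spec_change_odd_upper_even_lower; infer_instance

-- ===== CLAIM (what is proved, stated in full; the proofs are below) =====
def Claim_equal_change_odd_upper_even_lower : Prop := ∀ (my_string : String), Dom_change_odd_upper_even_lower my_string → Spec_change_odd_upper_even_lower my_string (change_odd_upper_even_lower my_string)

-- ===== LEMMAS AND PROOFS =====
theorem pvFoldA_eq_pairsB : ∀ (cs : List Char) (s : Int), s % 2 = 0 → ∀ (acc : List Char),
    (PySem.List.enumerate cs s).foldl
      (fun final_str p =>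
        final_str ++ [if PySem.Int.mod (p.1 + 1) 2 ≠ 0
                      then PySem.Chars.upperChar p.2
                      else PySem.Chars.lowerChar p.2]) acc
      = acc ++ pvPairsB cs
  | [], s, hs, acc => by simp [pvPairsB, PySem.List.enumerate_nil]
  | [a], s, hs, acc => by
      have h1 : PySem.Int.mod (s + 1) 2 ≠ 0 := by
        rw [PySem.Int.mod_eq_emod_of_pos (by norm_num)]; omega
      simp only [pvPairsB, PySem.List.enumerate_cons, PySem.List.enumerate_nil,
        List.foldl_cons, List.foldl_nil]
      rw [if_pos h1]
  | a :: b :: rest, s, hs, acc => by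
      have h1 : PySem.Int.mod (s + 1) 2 ≠ 0 := by
        rw [PySem.Int.mod_eq_emod_of_pos (by norm_num)]; omega
      have h2 : PySem.Int.mod (s + 1 + 1) 2 = 0 := by
        rw [PySem.Int.mod_eq_emod_of_pos (by norm_num)]; omega
      have ih := pvFoldA_eq_pairsB rest (s + 1 + 1) (by omega)
        (acc ++ [PySem.Chars.upperChar a] ++ [PySem.Chars.lowerChar b])
      simp only [pvPairsB, PySem.List.enumerate_cons, List.foldl_cons]
      rw [if_pos h1, if_neg (not_not_intro h2), ih]
      simp

-- ===== VERDICT (by name: the statement is the Claim_ definition above) =====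
theorem change_odd_upper_even_lower_spec : Claim_equal_change_odd_upper_even_lower := by
  intro s _
  unfold Spec_change_odd_upper_even_lower change_odd_upper_even_lower change_odd_upper_even_lower_alt
  rw [pvFoldA_eq_pairsB s.toList 0 (by norm_num) []]
  simp
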